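-- pv_equiv track=rewrite | github.com/honzalouny1/first_project | invoice_generator.py | convert_to_iban
-- ===== SOURCE A (Python) =====
-- def convert_to_iban(account_number, bank_code):
--     country_code = 'CZ'
--     account_number_padded = account_number.zfill(16)
--     bban = bank_code + account_number_padded
--     bban_numeric = ''.join(str(ord(c) - 55) if c.isalpha() else c for c in bban)
--     checksum_numeric = ''.join(str(ord(c) - 55) if c.isalpha() else c for c in country_code) + '00'
--     checksum = 98 - (int(bban_numeric + checksum_numeric) % 97)
--     return f"{country_code}{str(checksum).zfill(2)}{bban}"
-- ===== SOURCE B (Python) =====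
-- def convert_to_iban(account_number, bank_code):
--     bban = bank_code + account_number.zfill(16)
--     rem = 0
--     for c in bban + 'CZ00':
--         if c.isalpha():
--             rem = (rem * 100 + ord(c) - 55) % 97
--         else:
--             rem = (rem * 10 + ord(c) - 48) % 97
--     return f"CZ{98 - rem:02d}{bban}"
-- ===== Notes on version B (the rewrite author's own statement) =====
-- stated objective: faster
-- what changed: Replaces A's build-a-big-numeric-string-then-one-big-integer-modulo with a single pass folding each character into a small running remainder mod 97 (letters folded as rem*100+value), never materialising the numeric string or a big integer.
-- outside the precondition, e.g. on convert_to_iban('_', ''): A returns 'CZ79000000000000000_', B returns 'CZ71000000000000000_'; on convert_to_iban('-1', ''): A returns 'CZ47-000000000000001', B returns 'CZ11-000000000000001'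
import Mathlib
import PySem

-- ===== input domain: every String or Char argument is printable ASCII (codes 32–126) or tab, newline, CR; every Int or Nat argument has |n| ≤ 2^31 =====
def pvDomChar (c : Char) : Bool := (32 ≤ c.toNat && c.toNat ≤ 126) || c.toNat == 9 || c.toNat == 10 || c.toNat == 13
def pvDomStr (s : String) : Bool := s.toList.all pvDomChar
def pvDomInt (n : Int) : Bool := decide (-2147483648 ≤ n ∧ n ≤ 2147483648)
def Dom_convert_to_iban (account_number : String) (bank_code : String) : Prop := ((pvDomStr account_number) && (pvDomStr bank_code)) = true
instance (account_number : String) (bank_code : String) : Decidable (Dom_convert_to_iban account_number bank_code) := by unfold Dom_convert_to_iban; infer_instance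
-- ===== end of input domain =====

-- B replaces A's build-the-whole-numeric-string + one big-integer modulo by a single per-character
-- fold of a small running remainder mod 97 (alternative algorithm, no big integers).

-- ===== PORT A =====
-- hand port of int(s): under Pre_ the string fed to int() here is a nonempty all-digit string
-- (no sign, no whitespace, no underscore), and on exactly those this is Python-exact
-- (PySem.Int.ofChars? computes the same value there; its parser internals are private, so the
-- digit fold is written out to make the proof possible); none = ValueError.
def pvIntOfDigits? (cs : List Char) : Option Int :=
  if cs = [] then none
  else cs.foldlM (fun a c =>
    if PySem.Chars.isdigit c then some (a * 10 + ((c.toNat : Int) - 48)) else none) 0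

-- ''.join(str(ord(c) - 55) if c.isalpha() else c for c in l)
def pvExpand (l : List Char) : List Char :=
  PySem.Chars.join []
    (l.map (fun c => if PySem.Chars.isalpha c then PySem.Int.toChars ((c.toNat : Int) - 55) else [c]))

def convert_to_iban (account_number : String) (bank_code : String) : String :=
  let country_code : List Char := "CZ".toList
  let account_number_padded := PySem.Chars.zfill account_number.toList 16
  let bban := bank_code.toList ++ account_number_padded
  let bban_numeric := pvExpand bban
  let checksum_numeric := pvExpand country_code ++ "00".toList
  let n := (pvIntOfDigits? (bban_numeric ++ checksum_numeric)).getD 0  -- int() raises only outside Pre_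
  let checksum : Int := 98 - PySem.Int.mod n 97
  String.ofList (country_code ++ PySem.Chars.zfill (PySem.Int.toChars checksum) 2 ++ bban)

-- ===== PORT B =====
def pvStepB (rem : Int) (c : Char) : Int :=
  if PySem.Chars.isalpha c then PySem.Int.mod (rem * 100 + ((c.toNat : Int) - 55)) 97
  else PySem.Int.mod (rem * 10 + ((c.toNat : Int) - 48)) 97

def convert_to_iban_alt (account_number : String) (bank_code : String) : String :=
  let bban := bank_code.toList ++ PySem.Chars.zfill account_number.toList 16
  let rem := (bban ++ "CZ00".toList).foldl pvStepB 0
  -- f"CZ{98 - rem:02d}{bban}"; 98 - rem is always in 2..98, where :02d = zfill 2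
  String.ofList ("CZ".toList ++ PySem.Chars.zfill (PySem.Int.toChars (98 - rem)) 2 ++ bban)

-- ===== PRECONDITION & SPEC =====
-- Pre_ restricts both strings to alphanumeric ASCII characters — the natural domain of account
-- numbers and bank codes. Outside it A almost always raises ValueError in int(); on a few strings
-- with sign or underscore characters A still returns a value, but only by accident of int()'s
-- numeric-literal parsing (the sign/underscore chars survive into the printed BBAN while silently
-- steering the checksum), so those accidental values are excluded rather than matched.
def Pre_convert_to_iban (account_number : String) (bank_code : String) : Prop :=
  (account_number.toList.all PySem.Chars.isalnum && bank_code.toList.all PySem.Chars.isalnum) = true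
instance (account_number : String) (bank_code : String) : Decidable (Pre_convert_to_iban account_number bank_code) := by unfold Pre_convert_to_iban; infer_instance

def pvWitness_convert_to_iban : String × String := ("19123", "0800")

def Spec_convert_to_iban (account_number : String) (bank_code : String) (out : String) : Prop := out = convert_to_iban_alt account_number bank_code
instance (account_number : String) (bank_code : String) (out : String) : Decidable (Spec_convert_to_iban account_number bank_code out) := by unfold Spec_convert_to_iban; infer_instance

-- ===== CLAIM (what is proved, stated in full; the proofs are below) =====
def Claim_equal_convert_to_iban : Prop := ∀ (account_number : String) (bank_code : String), Dom_convert_to_iban account_number bank_code → Pre_convert_to_iban account_number bank_code → Spec_convert_to_iban account_number bank_code (convert_to_iban account_number bank_code)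

-- ===== LEMMAS AND PROOFS =====

-- the raw digit-accumulating fold (value of a digit string on top of accumulator a)
def pvDval (a : Int) (cs : List Char) : Int :=
  cs.foldl (fun a c => a * 10 + ((c.toNat : Int) - 48)) a

lemma pvDval_append (a : Int) (xs ys : List Char) :
    pvDval a (xs ++ ys) = pvDval (pvDval a xs) ys := by
  simp [pvDval, List.foldl_append]

lemma isalpha_bounds (c : Char) (h : PySem.Chars.isalpha c = true) :
    65 ≤ c.toNat ∧ c.toNat ≤ 122 := by
  simp only [PySem.Chars.isalpha, PySem.Chars.isupper, PySem.Chars.islower, Bool.or_eq_true,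
    Bool.and_eq_true, decide_eq_true_iff, Char.le_def, UInt32.le_iff_toNat_le, Char.toNat_val] at h
  rw [show 'A'.toNat = 65 from rfl, show 'Z'.toNat = 90 from rfl,
    show 'a'.toNat = 97 from rfl, show 'z'.toNat = 122 from rfl] at h
  omega

-- str(v) for 10 ≤ v ≤ 67 is exactly two digit characters with the obvious values
lemma toChars_two_digit (v : Nat) (h1 : 10 ≤ v) (h2 : v ≤ 67) :
    PySem.Int.toChars (v : Int) = [Char.ofNat (48 + v / 10), Char.ofNat (48 + v % 10)] ∧
    PySem.Chars.isdigit (Char.ofNat (48 + v / 10)) = true ∧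
    PySem.Chars.isdigit (Char.ofNat (48 + v % 10)) = true ∧
    (((Char.ofNat (48 + v / 10)).toNat : Int) - 48) * 10 + (((Char.ofNat (48 + v % 10)).toNat : Int) - 48) = (v : Int) := by
  interval_cases v <;> exact ⟨by decide, by decide, by decide, by decide⟩

lemma expand_eq_flatMap (l : List Char) :
    pvExpand l = l.flatMap (fun c => if PySem.Chars.isalpha c then PySem.Int.toChars ((c.toNat : Int) - 55) else [c]) := by
  induction l with
  | nil => simp [pvExpand, PySem.Chars.join, List.intercalate]
  | cons c l ih =>
    have h : ∀ (x : List Char) (xs : List (List Char)),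
        List.intercalate ([] : List Char) (x :: xs) = x ++ List.intercalate [] xs := by
      intro x xs
      induction xs <;> simp [List.intercalate, List.intersperse]
    simp only [pvExpand, PySem.Chars.join, List.map_cons, h, List.flatMap_cons]
    exact congrArg _ ih

lemma expand_append (xs ys : List Char) : pvExpand (xs ++ ys) = pvExpand xs ++ pvExpand ys := by
  simp [expand_eq_flatMap]

-- every character produced by the expansion of an alnum list is a digit
lemma expand_digits (l : List Char) (h : ∀ c ∈ l, PySem.Chars.isalnum c = true) :
    ∀ c ∈ pvExpand l, PySem.Chars.isdigit c = true := by
  intro d hd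
  rw [expand_eq_flatMap] at hd
  obtain ⟨c, hc, hdc⟩ := List.mem_flatMap.mp hd
  have hcal := h c hc
  by_cases ha : PySem.Chars.isalpha c = true
  · rw [if_pos ha] at hdc
    obtain ⟨hb1, hb2⟩ := isalpha_bounds c ha
    have hv : ((c.toNat : Int) - 55) = ((c.toNat - 55 : Nat) : Int) := by omega
    obtain ⟨he, hd1, hd2, _⟩ := toChars_two_digit (c.toNat - 55) (by omega) (by omega)
    rw [hv, he] at hdc
    simp only [List.mem_cons, List.not_mem_nil, or_false] at hdc
    rcases hdc with rfl | rfl <;> assumption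
  · rw [if_neg ha] at hdc
    simp at hdc
    subst hdc
    simp [PySem.Chars.isalnum, ha] at hcal
    exact hcal

lemma foldlM_digits (cs : List Char) (h : ∀ c ∈ cs, PySem.Chars.isdigit c = true) :
    ∀ a : Int, cs.foldlM (fun a c =>
      if PySem.Chars.isdigit c then some (a * 10 + ((c.toNat : Int) - 48)) else none) a
      = some (pvDval a cs) := by
  induction cs with
  | nil => intro a; simp [pvDval]
  | cons c cs ih =>
    intro a
    have hc := h c (by simp)
    rw [List.foldlM_cons, if_pos hc]
    have := ih (fun c hc => h c (by simp [hc])) (a * 10 + ((c.toNat : Int) - 48))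
    simpa [pvDval] using this

-- core bridge: B's running remainder equals A's digit value mod 97, over any alnum list
lemma bridge (l : List Char) (h : ∀ c ∈ l, PySem.Chars.isalnum c = true) :
    ∀ r : Int, l.foldl pvStepB (r % 97) = pvDval r (pvExpand l) % 97 := by
  induction l with
  | nil => intro r; simp [pvExpand, PySem.Chars.join, List.intercalate, pvDval]
  | cons c l ih =>
    intro r
    have hcal := h c (by simp)
    have ih' := ih (fun c hc => h c (by simp [hc]))
    have hsplit : pvExpand (c :: l) = pvExpand [c] ++ pvExpand l := by
      rw [show (c :: l) = [c] ++ l from rfl, expand_append]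
    rw [hsplit, pvDval_append, List.foldl_cons]
    by_cases ha : PySem.Chars.isalpha c = true
    · -- letter: one rem*100 step equals the two digit steps of its two-digit expansion
      obtain ⟨hb1, hb2⟩ := isalpha_bounds c ha
      have hv : ((c.toNat : Int) - 55) = ((c.toNat - 55 : Nat) : Int) := by omega
      obtain ⟨he, _, _, hval⟩ := toChars_two_digit (c.toNat - 55) (by omega) (by omega)
      have hex : pvExpand [c] = [Char.ofNat (48 + (c.toNat - 55) / 10), Char.ofNat (48 + (c.toNat - 55) % 10)] := by
        rw [expand_eq_flatMap]
        simp only [List.flatMap_cons, List.flatMap_nil, List.append_nil, if_pos ha]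
        rw [hv, he]
      have hstep : pvStepB (r % 97) c = (r * 100 + ((c.toNat : Int) - 55)) % 97 := by
        simp only [pvStepB, if_pos ha, PySem.Int.mod_eq_emod_of_pos (by omega : (0:Int) < 97)]
        omega
      rw [hstep, hex]
      have hval' : (((Char.ofNat (48 + (c.toNat - 55) / 10)).toNat : Int) - 48) * 10
          + (((Char.ofNat (48 + (c.toNat - 55) % 10)).toNat : Int) - 48) = ((c.toNat : Int) - 55) := by
        rw [hval]; omega
      have : pvDval r [Char.ofNat (48 + (c.toNat - 55) / 10), Char.ofNat (48 + (c.toNat - 55) % 10)]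
          = r * 100 + ((c.toNat : Int) - 55) := by
        simp only [pvDval, List.foldl_cons, List.foldl_nil]
        omega
      rw [this]
      exact ih' _
    · -- digit: one digit step on both sides
      have hex : pvExpand [c] = [c] := by
        rw [expand_eq_flatMap]
        simp [if_neg ha]
      have hstep : pvStepB (r % 97) c = (r * 10 + ((c.toNat : Int) - 48)) % 97 := by
        simp only [pvStepB, if_neg ha, PySem.Int.mod_eq_emod_of_pos (by omega : (0:Int) < 97)]
        omega
      rw [hstep, hex]
      have : pvDval r [c] = r * 10 + ((c.toNat : Int) - 48) := by
        simp [pvDval]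
      rw [this]
      exact ih' _

lemma mem_zfill_alnum (cs : List Char) (w : Int) (h : ∀ c ∈ cs, PySem.Chars.isalnum c = true) :
    ∀ c ∈ PySem.Chars.zfill cs w, PySem.Chars.isalnum c = true := by
  intro c hc
  cases cs with
  | nil =>
    simp only [PySem.Chars.zfill] at hc
    split at hc
    · exact absurd hc (by simp)
    · rw [List.eq_of_mem_replicate hc]
      decide
  | cons c0 rest =>
    have h0 := h c0 (by simp)
    simp only [PySem.Chars.zfill] at hc
    split at hc
    · exact h c hc
    · rw [if_neg (by rintro (rfl | rfl) <;> exact absurd h0 (by decide))] at hc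
      rcases List.mem_append.mp hc with h' | h'
      · rw [List.eq_of_mem_replicate h']
        decide
      · exact h c h'

-- ===== VERDICT (by name: the statement is the Claim_ definition above) =====
theorem convert_to_iban_spec : Claim_equal_convert_to_iban := by
  intro account_number bank_code _ hpre
  unfold Pre_convert_to_iban at hpre
  simp only [Bool.and_eq_true, List.all_eq_true] at hpre
  obtain ⟨hacc, hbank⟩ := hpre
  unfold Spec_convert_to_iban convert_to_iban convert_to_iban_alt
  -- the shared BBAN and its alnum-ness
  set bban := bank_code.toList ++ PySem.Chars.zfill account_number.toList 16 with hbban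
  have hbb : ∀ c ∈ bban, PySem.Chars.isalnum c = true := by
    intro c hc
    rcases List.mem_append.mp hc with h' | h'
    · exact hbank c h'
    · exact mem_zfill_alnum _ _ hacc c h'
  have hL : ∀ c ∈ bban ++ "CZ00".toList, PySem.Chars.isalnum c = true := by
    intro c hc
    rcases List.mem_append.mp hc with h' | h'
    · exact hbb c h'
    · simp at h'
      rcases h' with rfl | rfl | rfl <;> decide
  -- A's numeric string is the expansion of bban ++ "CZ00"
  have hcz : pvExpand "CZ".toList ++ "00".toList = pvExpand "CZ00".toList := by decide
  have hS : pvExpand bban ++ (pvExpand "CZ".toList ++ "00".toList) = pvExpand (bban ++ "CZ00".toList) := by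
    rw [expand_append bban "CZ00".toList, ← hcz]
  -- A's int() succeeds and returns the digit value
  have hdig := expand_digits _ hL
  have hne : pvExpand (bban ++ "CZ00".toList) ≠ [] := by
    rw [expand_append bban "CZ00".toList]
    intro hnil
    exact absurd (List.append_eq_nil_iff.mp hnil).2 (by decide)
  have hA : pvIntOfDigits? (pvExpand bban ++ (pvExpand "CZ".toList ++ "00".toList))
      = some (pvDval 0 (pvExpand (bban ++ "CZ00".toList))) := by
    rw [hS]
    unfold pvIntOfDigits?
    rw [if_neg hne]
    exact foldlM_digits _ hdig 0
  -- B's remainder is that value mod 97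
  have hB : (bban ++ "CZ00".toList).foldl pvStepB 0 = pvDval 0 (pvExpand (bban ++ "CZ00".toList)) % 97 := by
    have := bridge (bban ++ "CZ00".toList) hL 0
    simpa using this
  simp only [PySem.Int.mod_eq_emod_of_pos (show (0 : Int) < 97 by omega)]
  rw [← hbban, hA, Option.getD_some, hB]
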